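-- pv_equiv track=rewrite | github.com/lxnn/advent-of-code-2020 | day-24/p1.py | sequence_to_coord
-- ===== SOURCE A (Python) =====
-- def sequence_to_coord(sequence):
--     i, j = 0, 0
--     for inst in sequence:
--         if inst == 'ne':
--             i -= 1
--         elif inst == 'e':
--             j += 1
--         elif inst == 'se':
--             i += 1
--             j += 1
--         elif inst == 'sw':
--             i += 1
--         elif inst == 'w':
--             j -= 1
--         elif inst == 'nw':
--             i -= 1
--             j -= 1
--         else:
--             assert False
--     return i, j
-- ===== SOURCE B (Python) =====
-- def sequence_to_coord(sequence):
--     assert not (set(sequence) - {'ne', 'e', 'se', 'sw', 'w', 'nw'})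
--     i = sequence.count('se') + sequence.count('sw') \
--         - sequence.count('ne') - sequence.count('nw')
--     j = sequence.count('e') + sequence.count('se') \
--         - sequence.count('w') - sequence.count('nw')
--     return i, j
-- ===== Notes on version B (the rewrite author's own statement) =====
-- stated objective: simpler
-- what changed: Replaces the per-element branch dispatch with an accumulator by counting each direction token and computing the coordinate as a closed-form linear combination of the six counts (invalid tokens still fail the assert, as in A).
import Mathlib
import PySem

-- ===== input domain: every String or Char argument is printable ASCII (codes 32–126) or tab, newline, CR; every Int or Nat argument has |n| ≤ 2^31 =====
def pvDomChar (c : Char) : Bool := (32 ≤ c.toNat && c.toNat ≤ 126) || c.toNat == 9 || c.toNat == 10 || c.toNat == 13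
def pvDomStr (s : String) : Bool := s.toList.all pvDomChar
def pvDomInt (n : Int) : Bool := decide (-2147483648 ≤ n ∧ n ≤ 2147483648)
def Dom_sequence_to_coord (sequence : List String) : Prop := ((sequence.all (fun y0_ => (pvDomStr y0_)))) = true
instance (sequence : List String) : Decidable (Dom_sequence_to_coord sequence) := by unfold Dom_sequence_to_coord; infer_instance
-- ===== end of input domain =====

-- B replaces A's per-element branch dispatch with count-then-linear-combination (objective: simpler).
-- ===== PORT A =====
def pvStepA (ij : Int × Int) (inst : String) : Int × Int :=
  if inst == "ne" then (ij.1 - 1, ij.2)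
  else if inst == "e" then (ij.1, ij.2 + 1)
  else if inst == "se" then (ij.1 + 1, ij.2 + 1)
  else if inst == "sw" then (ij.1 + 1, ij.2)
  else if inst == "w" then (ij.1, ij.2 - 1)
  else if inst == "nw" then (ij.1 - 1, ij.2 - 1)
  else ij  -- Python: assert False (AssertionError); unreachable under Pre_sequence_to_coord

def sequence_to_coord (sequence : List String) : Int × Int :=
  sequence.foldl pvStepA (0, 0)

-- ===== PORT B =====
def sequence_to_coord_alt (sequence : List String) : Int × Int :=
  -- the assert is unreachable under Pre_; counts as in Source B
  let c := fun (v : String) => (PySem.List.count sequence v : Int)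
  (c "se" + c "sw" - c "ne" - c "nw", c "e" + c "se" - c "w" - c "nw")

-- ===== PRECONDITION & SPEC =====
-- Pre_ excludes sequences containing a token other than the six directions, on which A raises AssertionError.
def Pre_sequence_to_coord (sequence : List String) : Prop :=
  ∀ s ∈ sequence, s ∈ ["ne", "e", "se", "sw", "w", "nw"]
instance (sequence : List String) : Decidable (Pre_sequence_to_coord sequence) := by
  unfold Pre_sequence_to_coord; infer_instance
def pvWitness_sequence_to_coord : List String := ["se", "w", "nw", "e", "e"]
-- ===== PRECONDITION & SPEC =====
def Spec_sequence_to_coord (sequence : List String) (out : Int × Int) : Prop := out = sequence_to_coord_alt sequence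
instance (sequence : List String) (out : Int × Int) : Decidable (Spec_sequence_to_coord sequence out) := by unfold Spec_sequence_to_coord; infer_instance

-- ===== CLAIM (what is proved, stated in full; the proofs are below) =====
def Claim_equal_sequence_to_coord : Prop := ∀ (sequence : List String), Dom_sequence_to_coord sequence → Pre_sequence_to_coord sequence → Spec_sequence_to_coord sequence (sequence_to_coord sequence)

-- ===== LEMMAS AND PROOFS =====
theorem foldl_stepA_count (sequence : List String) (h : Pre_sequence_to_coord sequence)
    (i j : Int) :
    sequence.foldl pvStepA (i, j) =
      (i + (List.count "se" sequence : Int) + List.count "sw" sequence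
         - List.count "ne" sequence - List.count "nw" sequence,
       j + (List.count "e" sequence : Int) + List.count "se" sequence
         - List.count "w" sequence - List.count "nw" sequence) := by
  induction sequence generalizing i j with
  | nil => simp
  | cons hd tl ih =>
    have htl : Pre_sequence_to_coord tl := fun s hs => h s (List.mem_cons_of_mem _ hs)
    have hhd := h hd (List.mem_cons_self ..)
    simp only [List.mem_cons, List.not_mem_nil, or_false] at hhd
    rcases hhd with rfl | rfl | rfl | rfl | rfl | rfl <;>
      simp [List.foldl_cons, pvStepA, ih htl, Prod.ext_iff] <;>
      omega

-- ===== VERDICT (by name: the statement is the Claim_ definition above) =====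
theorem sequence_to_coord_spec : Claim_equal_sequence_to_coord := by
  intro sequence _ hpre
  unfold Spec_sequence_to_coord sequence_to_coord sequence_to_coord_alt
  simp only [PySem.List.count_eq, foldl_stepA_count sequence hpre 0 0,
    Prod.mk.injEq]
  constructor <;> ring
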